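-- pv_equiv track=rewrite | github.com/Md-Hasib-Askari/leetcode-solutions | competitive_programming_templates_python_hasib.py | digit_dp_count
-- ===== SOURCE A (Python) =====
-- from functools import lru_cache
--
-- def digit_dp_count(N: int):
--     s = str(N)
--     @lru_cache(maxsize=None)
--     def dp(i, tight, parity):
--         if i == len(s):
--             return 1 if parity == 0 else 0
--         limit = int(s[i]) if tight else 9
--         total = 0
--         for d in range(0, limit + 1):
--             total += dp(i + 1, tight and d == limit, parity ^ (d & 1))
--         return total
--     return dp(0, True, 0)
-- ===== SOURCE B (Python) =====
-- def digit_dp_count(N: int):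
--     s = str(N)
--     n = len(s)
--     parity = 0
--     total = 0
--     for i in range(n):
--         cap = int(s[i])
--         rem = n - i - 1
--         if rem == 0:
--             # d in range(cap): count those whose parity completes to even
--             total += cap // 2 if parity else (cap + 1) // 2
--         else:
--             # any d in range(cap): exactly half of the 10**rem free completions are even
--             total += cap * (10 ** rem // 2)
--         parity ^= cap & 1
--     return total + (1 if parity == 0 else 0)
-- ===== Notes on version B (the rewrite author's own statement) =====
-- stated objective: simpler
-- what changed: Replaced the memoized recursive digit DP over (position, tight, parity) states with a single left-to-right loop that keeps only the prefix parity and adds a closed-form count at each position (half of the free completions, or an even/odd count at the last digit).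
import Mathlib
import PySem

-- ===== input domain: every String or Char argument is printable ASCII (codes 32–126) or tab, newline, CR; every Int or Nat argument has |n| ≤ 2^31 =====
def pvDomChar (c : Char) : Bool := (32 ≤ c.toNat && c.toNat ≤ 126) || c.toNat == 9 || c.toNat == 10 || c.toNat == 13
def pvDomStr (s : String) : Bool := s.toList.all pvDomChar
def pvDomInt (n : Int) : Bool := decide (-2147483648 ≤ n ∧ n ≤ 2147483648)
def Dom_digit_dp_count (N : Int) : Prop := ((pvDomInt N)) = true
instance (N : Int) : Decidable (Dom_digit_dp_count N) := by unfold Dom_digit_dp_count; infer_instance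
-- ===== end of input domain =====

-- B replaces A's memoized digit DP by one left-to-right pass with a closed-form
-- count per position (objective: simpler — no recursion, no cache).

-- ===== PORT A =====
-- A's dp(i, tight, parity) with its @lru_cache: the cache is a dict keyed by the call
-- arguments (i, tight, parity), threaded through the recursion; `i` is carried as
-- s.length - suf.length where suf is the suffix of s starting at position i.
-- `int(s[i])` is transcribed as `c.toNat - 48`, exact for the digit characters that
-- str(N) produces when N ≥ 0 (Pre_ below excludes N < 0, where Python raises ValueError).
mutual
def pvDpAGo (s : List Char) (suf : List Char) (tight : Bool) (parity : Nat)
    (cache : PySem.Dict (Nat × Bool × Nat) Int) :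
    Int × PySem.Dict (Nat × Bool × Nat) Int :=
  let i := s.length - suf.length
  match PySem.Dict.get? cache (i, tight, parity) with
  | some v => (v, cache)
  | none =>
    match suf with
    | [] =>
      let v : Int := if parity = 0 then 1 else 0
      (v, PySem.Dict.insert cache (i, tight, parity) v)
    | c :: rest =>
      let limit : Nat := if tight then c.toNat - 48 else 9
      let r := pvDpALoop s rest tight limit parity (List.range (limit + 1)) 0 cache
      (r.1, PySem.Dict.insert r.2 (i, tight, parity) r.1)
termination_by (suf.length, 1, 0)

def pvDpALoop (s : List Char) (rest : List Char) (tight : Bool) (limit : Nat) (parity : Nat)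
    (ds : List Nat) (total : Int) (cache : PySem.Dict (Nat × Bool × Nat) Int) :
    Int × PySem.Dict (Nat × Bool × Nat) Int :=
  match ds with
  | [] => (total, cache)
  | d :: ds' =>
    let r := pvDpAGo s rest (tight && decide (d = limit)) (parity ^^^ (d &&& 1)) cache
    pvDpALoop s rest tight limit parity ds' (total + r.1) r.2
termination_by (rest.length, 2, ds.length)
end

def digit_dp_count (N : Int) : Int :=
  let s := (PySem.Int.toStr N).toList
  (pvDpAGo s s true 0 PySem.Dict.empty).1

-- ===== PORT B =====
-- the loop of Source B, tail-recursively over the remaining characters; the final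
-- `total + (1 if parity == 0 else 0)` after the loop is the base case.
def pvGoB : List Char → Nat → Int → Int
  | [], parity, total => total + (if parity = 0 then 1 else 0)
  | c :: rest, parity, total =>
    let cap : Nat := c.toNat - 48
    let rem : Nat := rest.length
    let total' : Int :=
      if rem = 0 then
        total + (if parity = 0 then PySem.Int.floordiv ((cap : Int) + 1) 2
                 else PySem.Int.floordiv (cap : Int) 2)
      else
        total + (cap : Int) * PySem.Int.floordiv (10 ^ rem) 2
    pvGoB rest (parity ^^^ (cap &&& 1)) total'

def digit_dp_count_alt (N : Int) : Int := pvGoB (PySem.Int.toStr N).toList 0 0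

-- ===== PRECONDITION & SPEC =====
-- Pre_ excludes N < 0: there str(N) starts with '-' and int(s[0]) raises ValueError in A (and in B).
def Pre_digit_dp_count (N : Int) : Prop := 0 ≤ N
instance (N : Int) : Decidable (Pre_digit_dp_count N) := by unfold Pre_digit_dp_count; infer_instance
def pvWitness_digit_dp_count : Int := (7)

def Spec_digit_dp_count (N : Int) (out : Int) : Prop := out = digit_dp_count_alt N
instance (N : Int) (out : Int) : Decidable (Spec_digit_dp_count N out) := by unfold Spec_digit_dp_count; infer_instance

-- ===== CLAIM (what is proved, stated in full; the proofs are below) =====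
def Claim_equal_digit_dp_count : Prop := ∀ (N : Int), Dom_digit_dp_count N → Pre_digit_dp_count N → Spec_digit_dp_count N (digit_dp_count N)

-- ===== LEMMAS AND PROOFS =====

-- proof-only helper: the UNCACHED recursion dp(i,tight,parity), indexed by the suffix
def pvDpA : List Char → Bool → Nat → Int
  | [], _, parity => if parity = 0 then 1 else 0
  | c :: rest, tight, parity =>
    let limit : Nat := if tight then c.toNat - 48 else 9
    (List.range (limit + 1)).foldl
      (fun total d => total + pvDpA rest (tight && decide (d = limit)) (parity ^^^ (d &&& 1))) 0

lemma pvDpA_cons (c : Char) (rest : List Char) (tight : Bool) (p : Nat) :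
    pvDpA (c :: rest) tight p
      = (List.range ((if tight then c.toNat - 48 else 9) + 1)).foldl
          (fun total d => total + pvDpA rest (tight && decide (d = (if tight then c.toNat - 48 else 9)))
            (p ^^^ (d &&& 1))) 0 := rfl

lemma pv_foldl_add (g : Nat → Int) : ∀ (l : List Nat) (a : Int),
    l.foldl (fun t d => t + g d) a = a + (l.map g).sum := by
  intro l
  induction l with
  | nil => intro a; simp
  | cons x xs ih => intro a; simp [List.foldl_cons, ih]; ring

lemma pv_xor_lt_two {p m : Nat} (hp : p < 2) (hm : m < 2) : p ^^^ m < 2 := by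
  interval_cases p <;> interval_cases m <;> decide

lemma pv_and_one_lt_two (d : Nat) : d &&& 1 < 2 := by
  have : d &&& 1 = d % 2 := Nat.and_one_is_mod d
  omega

-- definitional unfoldings of one step of each port
lemma pvDpA_cons_true (c : Char) (rest : List Char) (p : Nat) :
    pvDpA (c :: rest) true p
      = (List.range ((c.toNat - 48) + 1)).foldl
          (fun total d => total + pvDpA rest (true && decide (d = c.toNat - 48)) (p ^^^ (d &&& 1))) 0 := rfl

lemma pvDpA_cons_false (c : Char) (rest : List Char) (p : Nat) :
    pvDpA (c :: rest) false p
      = (List.range (9 + 1)).foldl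
          (fun total d => total + pvDpA rest (false && decide (d = 9)) (p ^^^ (d &&& 1))) 0 := rfl

lemma pvGoB_cons (c : Char) (rest : List Char) (p : Nat) (t : Int) :
    pvGoB (c :: rest) p t
      = pvGoB rest (p ^^^ ((c.toNat - 48) &&& 1))
          (if rest.length = 0 then
             t + (if p = 0 then PySem.Int.floordiv (((c.toNat - 48 : Nat) : Int) + 1) 2
                  else PySem.Int.floordiv ((c.toNat - 48 : Nat) : Int) 2)
           else t + ((c.toNat - 48 : Nat) : Int) * PySem.Int.floordiv (10 ^ rest.length) 2) := rfl

-- with tight = false every parity-in-{0,1} suffix count is exactly half of 10^len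
lemma pv_free_count : ∀ (rest : List Char) (c : Char) (p : Nat), p < 2 →
    pvDpA (c :: rest) false p = 5 * 10 ^ rest.length := by
  intro rest
  induction rest with
  | nil =>
    intro c p hp
    interval_cases p <;> simp [pvDpA] <;> decide
  | cons c' rest' ih =>
    intro c p hp
    rw [pvDpA_cons_false, pv_foldl_add]
    have hterm : (List.range (9 + 1)).map
          (fun d => pvDpA (c' :: rest') (false && decide (d = 9)) (p ^^^ (d &&& 1)))
        = (List.range (9 + 1)).map (fun _ => (5 * 10 ^ rest'.length : Int)) := by
      apply List.map_congr_left
      intro d _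
      simp only [Bool.false_and]
      exact ih c' _ (pv_xor_lt_two hp (pv_and_one_lt_two d))
    rw [hterm]
    simp [List.range_succ, List.length_cons, pow_succ]
    ring

-- sum over d < cap of the free counts, rest nonempty
lemma pv_sum_free (c' : Char) (rest' : List Char) (p : Nat) (hp : p < 2) : ∀ (cap : Nat),
    ((List.range cap).map (fun d => pvDpA (c' :: rest') false (p ^^^ (d &&& 1)))).sum
      = (cap : Int) * (5 * 10 ^ rest'.length) := by
  intro cap
  induction cap with
  | zero => simp
  | succ k ih =>
    rw [List.range_succ]
    simp only [List.map_append, List.sum_append, ih, List.map_cons, List.map_nil,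
      List.sum_cons, List.sum_nil]
    rw [pv_free_count rest' c' _ (pv_xor_lt_two hp (pv_and_one_lt_two k))]
    push_cast; ring

-- sum over d < cap of the empty-suffix indicators
lemma pv_sum_empty (p : Nat) (hp : p < 2) : ∀ (cap : Nat),
    ((List.range cap).map (fun d => pvDpA [] false (p ^^^ (d &&& 1)))).sum
      = (if p = 0 then PySem.Int.floordiv ((cap : Int) + 1) 2 else PySem.Int.floordiv (cap : Int) 2) := by
  intro cap
  induction cap with
  | zero =>
    interval_cases p <;> simp [PySem.Int.floordiv]
  | succ k ih =>
    rw [List.range_succ]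
    simp only [List.map_append, List.sum_append, ih, List.map_cons, List.map_nil,
      List.sum_cons, List.sum_nil]
    have hk : k &&& 1 = k % 2 := Nat.and_one_is_mod k
    have h2 : (0 : Int) < 2 := by norm_num
    rw [PySem.Int.floordiv_eq_ediv_of_pos h2, PySem.Int.floordiv_eq_ediv_of_pos h2,
      PySem.Int.floordiv_eq_ediv_of_pos h2, PySem.Int.floordiv_eq_ediv_of_pos h2] at *
    interval_cases p <;>
      rcases Nat.mod_two_eq_zero_or_one k with h | h <;>
      simp [pvDpA, hk, h, Nat.xor_comm] <;> omega

-- the main invariant: B's loop accumulates exactly A's tight-path count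
lemma pv_main : ∀ (ds : List Char) (p : Nat), p < 2 → ∀ (t : Int),
    pvGoB ds p t = t + pvDpA ds true p := by
  intro ds
  induction ds with
  | nil => intro p hp t; simp [pvGoB, pvDpA]
  | cons c rest ih =>
    intro p hp t
    have hp' : p ^^^ ((c.toNat - 48) &&& 1) < 2 :=
      pv_xor_lt_two hp (pv_and_one_lt_two _)
    have hmap : (List.range (c.toNat - 48)).map
          (fun d => pvDpA rest (true && decide (d = c.toNat - 48)) (p ^^^ (d &&& 1)))
        = (List.range (c.toNat - 48)).map (fun d => pvDpA rest false (p ^^^ (d &&& 1))) := by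
      apply List.map_congr_left
      intro d hd
      have hne : d ≠ c.toNat - 48 := Nat.ne_of_lt (List.mem_range.mp hd)
      simp [hne]
    have hsplit : pvDpA (c :: rest) true p
        = ((List.range (c.toNat - 48)).map
            (fun d => pvDpA rest false (p ^^^ (d &&& 1)))).sum
          + pvDpA rest true (p ^^^ ((c.toNat - 48) &&& 1)) := by
      rw [pvDpA_cons_true]
      rw [pv_foldl_add, List.range_succ]
      simp only [List.map_append, List.map_cons, List.map_nil, List.sum_append,
        List.sum_cons, List.sum_nil]
      rw [hmap]
      simp
    rw [pvGoB_cons, ih _ hp', hsplit]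
    cases rest with
    | nil =>
      simp only [List.length_nil, reduceIte]
      rw [pv_sum_empty p hp]
      ring
    | cons c' rest' =>
      simp only [List.length_cons, if_neg (Nat.succ_ne_zero _)]
      rw [pv_sum_free c' rest' p hp]
      have hfd : PySem.Int.floordiv (10 ^ (rest'.length + 1)) 2 = 5 * 10 ^ rest'.length := by
        rw [PySem.Int.floordiv_eq_ediv_of_pos (by norm_num), pow_succ]
        omega
      rw [hfd]
      ring

-- ===== memoization correctness for port A =====

def pvValid (s : List Char) (cache : PySem.Dict (Nat × Bool × Nat) Int) : Prop :=
  ∀ i t p v, PySem.Dict.get? cache (i, t, p) = some v → v = pvDpA (s.drop i) t p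

lemma pv_drop_of_suffix {suf s : List Char} (h : suf <:+ s) :
    s.drop (s.length - suf.length) = suf := by
  obtain ⟨pre, rfl⟩ := h
  have hlen : (pre ++ suf).length - suf.length = pre.length := by simp
  rw [hlen, List.drop_left]

lemma pvValid_empty (s : List Char) : pvValid s PySem.Dict.empty := by
  intro i t p v h
  simp [PySem.Dict.empty, PySem.Dict.get?] at h

lemma pvValid_insert {s : List Char} {cache : PySem.Dict (Nat × Bool × Nat) Int}
    (hc : pvValid s cache) {i : Nat} {t : Bool} {p : Nat} {v : Int}
    (hv : v = pvDpA (s.drop i) t p) :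
    pvValid s (PySem.Dict.insert cache (i, t, p) v) := by
  intro i' t' p' v' h
  by_cases hk : ((i', t', p') : Nat × Bool × Nat) = (i, t, p)
  · have h1 : i' = i := congrArg Prod.fst hk
    have h2 : t' = t := congrArg (fun x : Nat × Bool × Nat => x.2.1) hk
    have h3 : p' = p := congrArg (fun x : Nat × Bool × Nat => x.2.2) hk
    subst h1; subst h2; subst h3
    rw [PySem.Dict.get?_insert_self] at h
    cases h
    exact hv
  · rw [PySem.Dict.get?_insert_of_ne _ _ hk] at h
    exact hc i' t' p' v' h

lemma pvDpAGo_nil (s : List Char) (tight : Bool) (p : Nat)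
    (cache : PySem.Dict (Nat × Bool × Nat) Int) :
    pvDpAGo s [] tight p cache =
      match PySem.Dict.get? cache (s.length - 0, tight, p) with
      | some v => (v, cache)
      | none => ((if p = 0 then 1 else 0 : Int),
          PySem.Dict.insert cache (s.length - 0, tight, p) (if p = 0 then 1 else 0)) := by
  rw [pvDpAGo.eq_def]; rfl

lemma pvDpAGo_cons (s : List Char) (c : Char) (rest : List Char) (tight : Bool) (p : Nat)
    (cache : PySem.Dict (Nat × Bool × Nat) Int) :
    pvDpAGo s (c :: rest) tight p cache =
      match PySem.Dict.get? cache (s.length - (rest.length + 1), tight, p) with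
      | some v => (v, cache)
      | none =>
        ((pvDpALoop s rest tight (if tight then c.toNat - 48 else 9) p
            (List.range ((if tight then c.toNat - 48 else 9) + 1)) 0 cache).1,
         PySem.Dict.insert
           (pvDpALoop s rest tight (if tight then c.toNat - 48 else 9) p
             (List.range ((if tight then c.toNat - 48 else 9) + 1)) 0 cache).2
           (s.length - (rest.length + 1), tight, p)
           (pvDpALoop s rest tight (if tight then c.toNat - 48 else 9) p
             (List.range ((if tight then c.toNat - 48 else 9) + 1)) 0 cache).1) := by
  rw [pvDpAGo.eq_def]; rfl

lemma pvDpALoop_nil (s rest : List Char) (tight : Bool) (limit p : Nat) (total : Int)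
    (cache : PySem.Dict (Nat × Bool × Nat) Int) :
    pvDpALoop s rest tight limit p [] total cache = (total, cache) := by
  rw [pvDpALoop.eq_def]

lemma pvDpALoop_cons (s rest : List Char) (tight : Bool) (limit p : Nat) (d : Nat)
    (ds' : List Nat) (total : Int) (cache : PySem.Dict (Nat × Bool × Nat) Int) :
    pvDpALoop s rest tight limit p (d :: ds') total cache =
      pvDpALoop s rest tight limit p ds'
        (total + (pvDpAGo s rest (tight && decide (d = limit)) (p ^^^ (d &&& 1)) cache).1)
        (pvDpAGo s rest (tight && decide (d = limit)) (p ^^^ (d &&& 1)) cache).2 := by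
  rw [pvDpALoop.eq_def]

lemma pv_loop_correct (s rest : List Char) (tight : Bool) (limit p : Nat)
    (hIH : ∀ t q cache, pvValid s cache →
      (pvDpAGo s rest t q cache).1 = pvDpA rest t q ∧ pvValid s (pvDpAGo s rest t q cache).2) :
    ∀ (ds : List Nat) (total : Int) (cache : PySem.Dict (Nat × Bool × Nat) Int),
      pvValid s cache →
      (pvDpALoop s rest tight limit p ds total cache).1
          = total + (ds.map (fun d => pvDpA rest (tight && decide (d = limit)) (p ^^^ (d &&& 1)))).sum
        ∧ pvValid s (pvDpALoop s rest tight limit p ds total cache).2 := by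
  intro ds0
  induction ds0 with
  | nil =>
    intro total cache hc
    rw [pvDpALoop_nil]
    exact ⟨by simp, hc⟩
  | cons d ds' ih =>
    intro total cache hc
    obtain ⟨h1, h2⟩ := hIH (tight && decide (d = limit)) (p ^^^ (d &&& 1)) cache hc
    obtain ⟨h3, h4⟩ := ih (total + (pvDpAGo s rest (tight && decide (d = limit)) (p ^^^ (d &&& 1)) cache).1)
      (pvDpAGo s rest (tight && decide (d = limit)) (p ^^^ (d &&& 1)) cache).2 h2
    rw [pvDpALoop_cons]
    refine ⟨?_, h4⟩
    simp only [List.map_cons, List.sum_cons]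
    rw [h3, h1]
    ring

lemma pv_go_correct (s : List Char) : ∀ (suf : List Char), suf <:+ s →
    ∀ (tight : Bool) (p : Nat) (cache : PySem.Dict (Nat × Bool × Nat) Int), pvValid s cache →
      (pvDpAGo s suf tight p cache).1 = pvDpA suf tight p
        ∧ pvValid s (pvDpAGo s suf tight p cache).2 := by
  intro suf
  induction suf with
  | nil =>
    intro _ tight p cache hc
    rw [pvDpAGo_nil]
    cases hget : PySem.Dict.get? cache (s.length - 0, tight, p) with
    | some v =>
      refine ⟨?_, hc⟩
      have hv := hc _ _ _ _ hget
      simpa [List.drop_length, pvDpA] using hv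
    | none =>
      refine ⟨by simp [pvDpA], ?_⟩
      exact pvValid_insert hc (by simp [List.drop_length, pvDpA])
  | cons c rest ih =>
    intro hsuf tight p cache hc
    have hdrop : s.drop (s.length - (rest.length + 1)) = c :: rest := by
      have := pv_drop_of_suffix hsuf
      simpa using this
    have hrest : rest <:+ s := (List.suffix_cons c rest).trans hsuf
    have hIH := fun t q ca hca => ih hrest t q ca hca
    rw [pvDpAGo_cons]
    cases hget : PySem.Dict.get? cache (s.length - (rest.length + 1), tight, p) with
    | some v =>
      refine ⟨?_, hc⟩
      have hv := hc _ _ _ _ hget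
      rw [hdrop] at hv
      exact hv
    | none =>
      obtain ⟨hl1, hl2⟩ := pv_loop_correct s rest tight (if tight then c.toNat - 48 else 9) p hIH
        (List.range ((if tight then c.toNat - 48 else 9) + 1)) 0 cache hc
      have hval : (pvDpALoop s rest tight (if tight then c.toNat - 48 else 9) p
            (List.range ((if tight then c.toNat - 48 else 9) + 1)) 0 cache).1
          = pvDpA (c :: rest) tight p := by
        rw [hl1, pvDpA_cons, pv_foldl_add]
      refine ⟨hval, ?_⟩
      exact pvValid_insert hl2 (by rw [hdrop]; exact hval)

-- ===== VERDICT (by name: the statement is the Claim_ definition above) =====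
theorem digit_dp_count_spec : Claim_equal_digit_dp_count := by
  intro N _ _
  show digit_dp_count N = digit_dp_count_alt N
  unfold digit_dp_count digit_dp_count_alt
  rw [(pv_go_correct _ _ (List.suffix_refl _) true 0 _ (pvValid_empty _)).1]
  rw [pv_main _ 0 (by norm_num)]
  ring
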